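-- pv_equiv track=rewrite | github.com/haroonkhan02/15-112 | Week 7/CTMidterm1.py | rc2
-- ===== SOURCE A (Python) =====
-- def rc2(M):
--     assert(isinstance(M, list))
--     (i, n) = (3, 1)
--     for val in M:
--         if (int(str(i)*n) != val):
--             return False
--         i -= 1
--         if (i == 0): (i, n) = (3, n+1)
--     return (len(M) == 7)
-- ===== SOURCE B (Python) =====
-- def rc2(M):
--     assert(isinstance(M, list))
--     return M == [3, 2, 1, 33, 22, 11, 333]
-- ===== Notes on version B (the rewrite author's own statement) =====
-- stated objective: simpler
-- what changed: The generate-and-scan loop (cycling i over 3,2,1 with growing repetition count) is replaced by a direct comparison of M against the only list the loop ever accepts, [3, 2, 1, 33, 22, 11, 333].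
import Mathlib
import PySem

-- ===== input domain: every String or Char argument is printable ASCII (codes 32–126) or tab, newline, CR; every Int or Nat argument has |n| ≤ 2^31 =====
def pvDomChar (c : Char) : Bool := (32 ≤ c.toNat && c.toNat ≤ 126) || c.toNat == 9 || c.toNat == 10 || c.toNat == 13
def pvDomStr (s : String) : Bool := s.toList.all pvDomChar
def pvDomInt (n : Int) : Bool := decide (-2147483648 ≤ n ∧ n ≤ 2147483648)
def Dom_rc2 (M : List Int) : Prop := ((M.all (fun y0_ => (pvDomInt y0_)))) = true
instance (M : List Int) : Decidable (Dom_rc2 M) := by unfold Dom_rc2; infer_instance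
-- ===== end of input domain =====

-- B replaces A's generate-and-scan loop with a direct comparison against the one accepted list; equally fast, simpler.
-- ===== PORT A =====
-- int(str(i)*n); none (ValueError on empty string) is unreachable for the loop's states, ported as `false` (return-path never taken)
def rc2Step (i n : Int) : Option Int :=
  PySem.Int.ofChars? (PySem.List.pyRepeat (PySem.Int.toChars i) n)

def rc2Loop (l : List Int) (i n : Int) (len7 : Bool) : Bool :=
  match l with
  | [] => len7
  | val :: rest =>
    match rc2Step i n with
    | none => false
    | some x =>
      if x ≠ val then false
      else
        let i' := i - 1
        if i' = 0 then rc2Loop rest 3 (n + 1) len7 else rc2Loop rest i' n len7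

def rc2 (M : List Int) : Bool := rc2Loop M 3 1 ((M.length : Int) == 7)

-- ===== PORT B =====
def rc2_alt (M : List Int) : Bool := M == [3, 2, 1, 33, 22, 11, 333]

-- ===== PRECONDITION & SPEC =====
def Spec_rc2 (M : List Int) (out : Bool) : Prop := out = rc2_alt M
instance (M : List Int) (out : Bool) : Decidable (Spec_rc2 M out) := by unfold Spec_rc2; infer_instance

-- ===== CLAIM (what is proved, stated in full; the proofs are below) =====
def Claim_equal_rc2 : Prop := ∀ (M : List Int), Dom_rc2 M → Spec_rc2 M (rc2 M)

-- ===== LEMMAS AND PROOFS =====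

-- ===== VERDICT (by name: the statement is the Claim_ definition above) =====
theorem len7_false (l : List Int) (i n : Int) : rc2Loop l i n false = false := by
  induction l generalizing i n with
  | nil => rfl
  | cons v rest ih =>
      simp only [rc2Loop]
      cases rc2Step i n with
      | none => rfl
      | some x =>
        simp only [ih]
        split
        · rfl
        · split <;> rfl

theorem step31 : rc2Step 3 1 = some 3 := by decide
theorem step21 : rc2Step 2 1 = some 2 := by decide
theorem step11 : rc2Step 1 1 = some 1 := by decide
theorem step32 : rc2Step 3 2 = some 33 := by decide
theorem step22 : rc2Step 2 2 = some 22 := by decide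
theorem step12 : rc2Step 1 2 = some 11 := by decide
theorem step33 : rc2Step 3 3 = some 333 := by decide

theorem rc2_spec : Claim_equal_rc2 := by
  intro M _
  unfold Spec_rc2
  by_cases h7 : M.length = 7
  · match M, h7 with
    | [a, b, c, d, e, f, g], _ =>
      show rc2Loop _ 3 1 _ = _
      norm_num [rc2Loop, rc2_alt, step31, step21, step11, step32, step22, step12, step33]
      rw [Bool.eq_iff_iff]
      simp only [Bool.and_eq_true, decide_eq_true_eq, beq_iff_eq]
      constructor <;> (intro h; omega)
  · have hA : rc2 M = false := by
      have : ((M.length : Int) == 7) = false := by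
        simp only [beq_eq_false_iff_ne]; omega
      unfold rc2; rw [this]; exact len7_false M 3 1
    have hB : rc2_alt M = false := by
      unfold rc2_alt
      simp only [beq_eq_false_iff_ne]
      intro he; rw [he] at h7; simp at h7
    rw [hA, hB]
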